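-- pv_equiv track=rewrite | github.com/Rootless-Ghost/LogNorm | core/models.py | parse_hash_string
-- ===== SOURCE A (Python) =====
-- def parse_hash_string(hash_str: str) -> tuple[str, str]:
--     """
--     Parse a Sysmon-style hash string like 'MD5=abc,SHA256=def,...'
--     and return (md5, sha256).
--     """
--     md5 = sha256 = ""
--     for part in hash_str.split(","):
--         part = part.strip()
--         if "=" in part:
--             k, _, v = part.partition("=")
--             k = k.strip().upper()
--             v = v.strip()
--             if k == "MD5":
--                 md5 = v
--             elif k in ("SHA256", "SHA-256"):
--                 sha256 = v
--     return md5, sha256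
-- ===== SOURCE B (Python) =====
-- def parse_hash_string(hash_str: str) -> tuple[str, str]:
--     """
--     Parse a Sysmon-style hash string like 'MD5=abc,SHA256=def,...'
--     and return (md5, sha256).
--     """
--     pairs = [(k.strip().upper(), v.strip())
--              for k, sep, v in (p.strip().partition("=") for p in hash_str.split(","))
--              if sep]
--
--     def first_match(keys):
--         # scanning back-to-front, the first hit is the last occurrence,
--         # which is exactly the value that survives A's overwriting loop
--         for k, v in reversed(pairs):
--             if k in keys:
--                 return v
--         return ""
--
--     return first_match(("MD5",)), first_match(("SHA256", "SHA-256"))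
-- ===== Notes on version B (the rewrite author's own statement) =====
-- stated objective: alternative
-- what changed: B replaces A's single forward pass with mutable result variables by a staged decomposition: it first materializes the list of normalized (key, value) pairs, then answers each of the two queries by a back-to-front first-match scan over that list (last occurrence wins by searching in reverse instead of by overwriting).
import Mathlib
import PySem

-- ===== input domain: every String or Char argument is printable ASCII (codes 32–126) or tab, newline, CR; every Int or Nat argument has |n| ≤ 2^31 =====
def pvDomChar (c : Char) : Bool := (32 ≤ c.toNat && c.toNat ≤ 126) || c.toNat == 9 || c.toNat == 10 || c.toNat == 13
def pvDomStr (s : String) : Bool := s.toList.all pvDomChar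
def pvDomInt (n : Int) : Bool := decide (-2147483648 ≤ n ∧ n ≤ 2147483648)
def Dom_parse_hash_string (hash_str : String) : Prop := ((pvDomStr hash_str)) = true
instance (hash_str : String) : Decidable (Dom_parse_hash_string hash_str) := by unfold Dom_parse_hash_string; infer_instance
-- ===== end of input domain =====

-- B is a staged decomposition: materialize the normalized (key, value) pairs, then
-- answer each query by a back-to-front first-match scan (alternative, same cost).

-- ===== PORT A =====
-- exact port of s.partition("=") for the single-char separator "=":
-- (before first '=', the separator found (or ""), after first '=')
def pvPartitionEq (cs : List Char) : List Char × String × List Char :=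
  match cs with
  | [] => ([], "", [])
  | c :: rest =>
    if c = '=' then ([], "=", rest)
    else
      let p := pvPartitionEq rest
      (c :: p.1, p.2.1, p.2.2)

-- loop body of A (the for-loop over hash_str.split(","); state = (md5, sha256))
def pvStepA (st : String × String) (part : String) : String × String :=
  let part := PySem.Str.strip part
  if PySem.Str.isIn "=" part then
    let p := pvPartitionEq part.toList
    let k := PySem.Str.upper (PySem.Str.strip (String.ofList p.1))
    let v := PySem.Str.strip (String.ofList p.2.2)
    if k = "MD5" then (v, st.2)
    else if k = "SHA256" ∨ k = "SHA-256" then (st.1, v)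
    else st
  else st

def parse_hash_string (hash_str : String) : String × String :=
  ((PySem.Chars.splitOn hash_str.toList [',']).map String.ofList).foldl pvStepA ("", "")

-- ===== PORT B =====
-- the comprehension body: strip/partition a part, keep (upper key, stripped value) if sep ≠ ""
def pvPairB (part : String) : Option (String × String) :=
  let p := pvPartitionEq (PySem.Str.strip part).toList
  if p.2.1 ≠ "" then
    some (PySem.Str.upper (PySem.Str.strip (String.ofList p.1)),
          PySem.Str.strip (String.ofList p.2.2))
  else none

-- first_match's loop over reversed(pairs): first pair whose key is in keys, else ""
def pvFirstMatch (keys : List String) : List (String × String) → String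
  | [] => ""
  | (k, v) :: rest => if k ∈ keys then v else pvFirstMatch keys rest

def parse_hash_string_alt (hash_str : String) : String × String :=
  let pairs := ((PySem.Chars.splitOn hash_str.toList [',']).map String.ofList).filterMap pvPairB
  (pvFirstMatch ["MD5"] pairs.reverse, pvFirstMatch ["SHA256", "SHA-256"] pairs.reverse)

-- ===== PRECONDITION & SPEC =====
def Spec_parse_hash_string (hash_str : String) (out : String × String) : Prop := out = parse_hash_string_alt hash_str
instance (hash_str : String) (out : String × String) : Decidable (Spec_parse_hash_string hash_str out) := by unfold Spec_parse_hash_string; infer_instance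

-- ===== CLAIM (what is proved, stated in full; the proofs are below) =====
def Claim_equal_parse_hash_string : Prop := ∀ (hash_str : String), Dom_parse_hash_string hash_str → Spec_parse_hash_string hash_str (parse_hash_string hash_str)

-- ===== LEMMAS AND PROOFS =====

-- pvFirstMatch with an explicit default (the running state A carries)
def pvFM (d : String) (keys : List String) : List (String × String) → String
  | [] => d
  | (k, v) :: rest => if k ∈ keys then v else pvFM d keys rest

theorem pvFM_empty (keys : List String) (l : List (String × String)) :
    pvFM "" keys l = pvFirstMatch keys l := by
  induction l with
  | nil => rfl
  | cons p rest ih => cases p with | mk k v => simp [pvFM, pvFirstMatch, ih]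

theorem pvFM_append_singleton (d : String) (keys : List String)
    (l : List (String × String)) (pr : String × String) :
    pvFM d keys (l ++ [pr]) = pvFM (if pr.1 ∈ keys then pr.2 else d) keys l := by
  induction l with
  | nil => cases pr; simp [pvFM]
  | cons p rest ih => cases p with | mk k v => simp [pvFM, ih]

-- the key and value both loop bodies compute from a part
def pvKey (part : String) : String :=
  PySem.Str.upper (PySem.Str.strip (String.ofList (pvPartitionEq (PySem.Str.strip part).toList).1))
def pvVal (part : String) : String :=
  PySem.Str.strip (String.ofList (pvPartitionEq (PySem.Str.strip part).toList).2.2)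

-- the separator component of pvPartitionEq is nonempty iff '=' occurs
theorem pvPartitionEq_sep (cs : List Char) : ((pvPartitionEq cs).2.1 ≠ "") ↔ '=' ∈ cs := by
  induction cs with
  | nil => simp [pvPartitionEq]
  | cons c rest ih =>
    by_cases h : c = '='
    · subst h; simp [pvPartitionEq]
    · simp only [pvPartitionEq, if_neg h, List.mem_cons]
      rw [ih]
      constructor
      · exact Or.inr
      · rintro (h' | h')
        · exact absurd h'.symm h
        · exact h'

-- membership of '=' agrees with Python's "=" in s
theorem pvIsInChar (cs : List Char) : PySem.Chars.isIn ['='] cs = true ↔ '=' ∈ cs := by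
  constructor
  · intro h
    rcases (PySem.Chars.isIn_iff_infix ['='] cs).1 h with ⟨t, u, h⟩
    rw [← h]; simp
  · intro h
    rcases List.append_of_mem h with ⟨t, u, h⟩
    exact (PySem.Chars.isIn_iff_infix ['='] cs).2 ⟨t, u, by simp [h]⟩

theorem pvStepA_char (st : String × String) (part : String)
    (h : '=' ∈ (PySem.Str.strip part).toList) :
    pvStepA st part =
      (if pvKey part = "MD5" then (pvVal part, st.2)
       else if pvKey part = "SHA256" ∨ pvKey part = "SHA-256" then (st.1, pvVal part)
       else st) := by
  simp only [PySem.Str.toList_strip] at h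
  simp [pvStepA, pvKey, pvVal, (pvIsInChar _).2 h]

theorem pvStepA_skip (st : String × String) (part : String)
    (h : ¬ '=' ∈ (PySem.Str.strip part).toList) :
    pvStepA st part = st := by
  simp only [PySem.Str.toList_strip] at h
  have hC : PySem.Chars.isIn ['='] (PySem.Chars.strip part.toList) = false := by
    rw [Bool.eq_false_iff]
    intro hb
    exact h ((pvIsInChar _).1 hb)
  simp [pvStepA, hC]

theorem pvPairB_char (part : String) (h : '=' ∈ (PySem.Str.strip part).toList) :
    pvPairB part = some (pvKey part, pvVal part) := by
  have hB := (pvPartitionEq_sep _).2 h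
  simp only [PySem.Str.toList_strip] at hB ⊢
  simp [pvPairB, pvKey, pvVal, hB]

theorem pvPairB_skip (part : String) (h : ¬ '=' ∈ (PySem.Str.strip part).toList) :
    pvPairB part = none := by
  have hB : ¬ ((pvPartitionEq (PySem.Str.strip part).toList).2.1 ≠ "") := by
    simpa [pvPartitionEq_sep] using h
  simp only [PySem.Str.toList_strip] at hB
  simp [pvPairB, hB]

-- the invariant: A's running pair equals B's reverse first-match with the state as default
theorem pvInv (parts : List String) (m s : String) :
    parts.foldl pvStepA (m, s) =
      (pvFM m ["MD5"] (parts.filterMap pvPairB).reverse,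
       pvFM s ["SHA256", "SHA-256"] (parts.filterMap pvPairB).reverse) := by
  induction parts generalizing m s with
  | nil => simp [pvFM]
  | cons part rest ih =>
    by_cases hin : '=' ∈ (PySem.Str.strip part).toList
    · have hfm : ((part :: rest).filterMap pvPairB)
          = (pvKey part, pvVal part) :: rest.filterMap pvPairB := by
        rw [List.filterMap_cons, pvPairB_char part hin]
      rw [List.foldl_cons, pvStepA_char (m, s) part hin, hfm, List.reverse_cons,
          pvFM_append_singleton, pvFM_append_singleton]
      by_cases h1 : pvKey part = "MD5"
      · rw [if_pos h1, ih]
        have e1 : (if pvKey part ∈ ["MD5"] then pvVal part else m) = pvVal part := by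
          simp [h1]
        have e2 : (if pvKey part ∈ ["SHA256", "SHA-256"] then pvVal part else s) = s := by
          rw [if_neg]; rw [h1]; decide
        rw [e1, e2]
      · rw [if_neg h1]
        by_cases h2 : pvKey part = "SHA256" ∨ pvKey part = "SHA-256"
        · rw [if_pos h2, ih]
          have e1 : (if pvKey part ∈ ["MD5"] then pvVal part else m) = m := by
            simp [h1]
          have e2 : (if pvKey part ∈ ["SHA256", "SHA-256"] then pvVal part else s)
              = pvVal part := by
            rcases h2 with h2 | h2 <;> simp [h2]
          rw [e1, e2]
        · rw [if_neg h2, ih]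
          rw [not_or] at h2
          have e1 : (if pvKey part ∈ ["MD5"] then pvVal part else m) = m := by
            simp [h1]
          have e2 : (if pvKey part ∈ ["SHA256", "SHA-256"] then pvVal part else s) = s := by
            simp [h2.1, h2.2]
          rw [e1, e2]
    · have hfm : ((part :: rest).filterMap pvPairB) = rest.filterMap pvPairB := by
        rw [List.filterMap_cons, pvPairB_skip part hin]
      rw [List.foldl_cons, pvStepA_skip (m, s) part hin, hfm, ih]

-- ===== VERDICT (by name: the statement is the Claim_ definition above) =====
theorem parse_hash_string_spec : Claim_equal_parse_hash_string := by
  intro hash_str _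
  unfold Spec_parse_hash_string parse_hash_string parse_hash_string_alt
  rw [pvInv, pvFM_empty, pvFM_empty]
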